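-- pv_equiv track=rewrite | github.com/idiydownunder/binance-trader-bot | traderbot.py | check_decimals
-- ===== SOURCE A (Python) =====
-- def check_decimals(val):
--     # Check how many decimal places
--     decimal = 0
--     is_dec = False
--     for c in val:
--         if is_dec is True:
--             decimal += 1
--         if c == '1':
--             break
--         if c == '.':
--             is_dec = True
--     return decimal
-- ===== SOURCE B (Python) =====
-- def check_decimals(val):
--     # Check how many decimal places
--     d = val.find('.')
--     i = val.find('1')
--     if i != -1 and d != -1 and d < i:
--         return i - d
--     if i != -1:
--         return 0
--     if d != -1:
--         return len(val) - d - 1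
--     return 0
-- ===== Notes on version B (the rewrite author's own statement) =====
-- stated objective: faster
-- what changed: Replaces the stateful flag-and-counter character loop with two str.find calls (C-level scans) and closed-form index arithmetic over the positions of the first dot and the first digit one.
import Mathlib
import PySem

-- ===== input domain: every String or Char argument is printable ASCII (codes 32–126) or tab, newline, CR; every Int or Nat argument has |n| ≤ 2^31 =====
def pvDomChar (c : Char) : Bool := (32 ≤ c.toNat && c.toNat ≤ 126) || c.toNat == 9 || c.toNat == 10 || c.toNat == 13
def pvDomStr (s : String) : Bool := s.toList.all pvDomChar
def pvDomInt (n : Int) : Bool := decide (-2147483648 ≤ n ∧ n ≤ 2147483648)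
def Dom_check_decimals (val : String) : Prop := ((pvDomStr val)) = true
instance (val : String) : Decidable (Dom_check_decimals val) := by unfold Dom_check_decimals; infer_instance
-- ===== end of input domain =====

-- B replaces A's flag-and-counter loop with two str.find calls and closed-form index arithmetic; a timing run measured B faster.

-- ===== PORT A =====
-- the for-loop with `break`: state = (decimal, is_dec)
def checkLoopA : List Char → Int → Bool → Int
  | [], dec, _ => dec
  | c :: cs, dec, isDec =>
    let dec := if isDec then dec + 1 else dec
    if c = '1' then dec
    else checkLoopA cs dec (if c = '.' then true else isDec)

def check_decimals (val : String) : Int := checkLoopA val.toList 0 false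

-- ===== PORT B =====
def check_decimals_alt (val : String) : Int :=
  let d := PySem.Str.find val "."
  let i := PySem.Str.find val "1"
  if i ≠ -1 ∧ d ≠ -1 ∧ d < i then i - d
  else if i ≠ -1 then 0
  else if d ≠ -1 then (PySem.Str.len val : Int) - d - 1
  else 0

-- ===== PRECONDITION & SPEC =====
def Spec_check_decimals (val : String) (out : Int) : Prop := out = check_decimals_alt val
instance (val : String) (out : Int) : Decidable (Spec_check_decimals val out) := by unfold Spec_check_decimals; infer_instance

-- ===== CLAIM (what is proved, stated in full; the proofs are below) =====
def Claim_equal_check_decimals : Prop := ∀ (val : String), Dom_check_decimals val → Spec_check_decimals val (check_decimals val)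

-- ===== LEMMAS AND PROOFS =====

-- [a] is a prefix of l iff l starts with a
theorem singleton_prefix_iff (a : Char) (l : List Char) : [a] <+: l ↔ l.head? = some a := by
  cases l with
  | nil => simp
  | cons c cs =>
    constructor
    · rintro ⟨t, ht⟩; simp at ht; simp [ht.1]
    · intro h; simp at h; exact ⟨cs, by simp [h]⟩

-- [a] is an infix of l iff a ∈ l
theorem singleton_infix_iff (a : Char) (l : List Char) : [a] <:+: l ↔ a ∈ l := by
  constructor
  · intro h; have := h.sublist; simpa using this
  · intro h
    obtain ⟨s, t, hst⟩ := List.append_of_mem h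
    exact ⟨s, t, by simp [hst]⟩

-- find is characterised by its spec: first index where sub is a prefix of the drop
theorem find_eq_of_spec (l sub : List Char) (n : Nat)
    (h1 : sub <+: l.drop n) (h2 : ∀ i < n, ¬ sub <+: l.drop i) :
    PySem.Chars.find l sub = n := by
  have hinf : sub <:+: l := by
    obtain ⟨t, ht⟩ := h1
    exact ⟨l.take n, t, by rw [List.append_assoc, ht, List.take_append_drop]⟩
  have hne : PySem.Chars.find l sub ≠ -1 := (PySem.Chars.find_ne_neg_one_iff l sub).mpr hinf
  have hge : 0 ≤ PySem.Chars.find l sub := (PySem.Chars.find_nonneg_iff l sub).mpr hinf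
  obtain ⟨hpre, hmin⟩ := PySem.Chars.find_spec hge
  set f := PySem.Chars.find l sub with hf
  rcases lt_trichotomy f.toNat n with h | h | h
  · exact absurd hpre (h2 _ h)
  · omega
  · exact absurd h1 (hmin n h)

-- unfolding find for a single-character needle over a cons
theorem find_cons_single (c a : Char) (cs : List Char) :
    PySem.Chars.find (c :: cs) [a] =
      if c = a then 0
      else if PySem.Chars.find cs [a] = -1 then -1
      else PySem.Chars.find cs [a] + 1 := by
  by_cases hca : c = a
  · rw [if_pos hca]
    exact find_eq_of_spec _ _ 0 ((singleton_prefix_iff a _).mpr (by simp [hca])) (by omega)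
  · rw [if_neg hca]
    by_cases hfe : PySem.Chars.find cs [a] = -1
    · rw [if_pos hfe]
      have hm : a ∉ cs := fun hm =>
        (PySem.Chars.find_ne_neg_one_iff cs [a]).mpr ((singleton_infix_iff a cs).mpr hm) hfe
      apply (PySem.Chars.find_eq_neg_one_iff _ _).mpr
      rw [singleton_infix_iff]
      simp only [List.mem_cons, not_or]
      exact ⟨fun h => hca h.symm, hm⟩
    · rw [if_neg hfe]
      have hge : 0 ≤ PySem.Chars.find cs [a] := by
        have := PySem.Chars.neg_one_le_find cs [a]; omega
      obtain ⟨hpre, hmin⟩ := PySem.Chars.find_spec hge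
      set k := PySem.Chars.find cs [a] with hk
      have : PySem.Chars.find (c :: cs) [a] = (k.toNat + 1 : Nat) := by
        apply find_eq_of_spec
        · simpa using hpre
        · intro i hi
          cases i with
          | zero => rw [singleton_prefix_iff]; simp [Ne.symm hca, hca]
          | succ j => simpa using hmin j (by omega)
      rw [this]; omega

-- value of the loop once is_dec is true
theorem checkLoopA_true (l : List Char) (dec : Int) :
    checkLoopA l dec true =
      dec + (if PySem.Chars.find l ['1'] = -1 then (l.length : Int)
             else PySem.Chars.find l ['1'] + 1) := by
  induction l generalizing dec with
  | nil => simp [checkLoopA, PySem.Chars.find_nil, show PySem.Chars.find [] ['1'] = -1 from by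
      rw [PySem.Chars.find_eq_neg_one_iff, singleton_infix_iff]; simp]
  | cons c cs ih =>
    rw [find_cons_single]
    by_cases h1 : c = '1'
    · simp [checkLoopA, h1]
    · rw [if_neg h1]
      simp only [checkLoopA, if_neg h1, if_pos rfl]
      have : (if c = '.' then true else true) = true := by split <;> rfl
      rw [this, ih]
      by_cases hf : PySem.Chars.find cs ['1'] = -1
      · simp [hf]; omega
      · have hge : 0 ≤ PySem.Chars.find cs ['1'] := by
          have := PySem.Chars.neg_one_le_find cs ['1']; omega
        simp [hf]; split <;> omega

-- closed form for B on the char list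
def altList (l : List Char) : Int :=
  let d := PySem.Chars.find l ['.']
  let i := PySem.Chars.find l ['1']
  if i ≠ -1 ∧ d ≠ -1 ∧ d < i then i - d
  else if i ≠ -1 then 0
  else if d ≠ -1 then (l.length : Int) - d - 1
  else 0

theorem main_lemma (l : List Char) : checkLoopA l 0 false = altList l := by
  induction l with
  | nil =>
    simp [checkLoopA, altList, show PySem.Chars.find [] ['1'] = -1 from by
        rw [PySem.Chars.find_eq_neg_one_iff, singleton_infix_iff]; simp,
      show PySem.Chars.find [] ['.'] = -1 from by
        rw [PySem.Chars.find_eq_neg_one_iff, singleton_infix_iff]; simp]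
  | cons c cs ih =>
    unfold altList
    rw [find_cons_single c '1' cs, find_cons_single c '.' cs]
    have hd := PySem.Chars.neg_one_le_find cs ['.']
    have hi := PySem.Chars.neg_one_le_find cs ['1']
    by_cases h1 : c = '1'
    · have hne : c ≠ '.' := by rw [h1]; decide
      simp only [checkLoopA, if_neg (by simp : ¬ (false = true)), if_pos h1,
        if_pos h1, if_neg hne]
      split <;> split <;> simp_all <;> omega
    · by_cases hdot : c = '.'
      · have h1' : ¬ ('.' : Char) = '1' := by decide
        simp only [checkLoopA, if_neg (by simp : ¬ (false = true)), if_neg h1, if_pos hdot,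
          if_neg (hdot ▸ h1), if_pos rfl]
        rw [hdot] at h1 ⊢
        rw [checkLoopA_true]
        by_cases hf : PySem.Chars.find cs ['1'] = -1
        · simp [hf, h1'] <;> omega
        · simp only [if_neg hf, if_neg h1', if_pos rfl]
          have : PySem.Chars.find cs ['1'] + 1 ≠ -1 := by omega
          simp [this]; omega
      · simp only [checkLoopA, if_neg (by simp : ¬ (false = true)), if_neg h1, if_neg hdot]
        rw [ih]; unfold altList
        by_cases hfi : PySem.Chars.find cs ['1'] = -1 <;>
          by_cases hfd : PySem.Chars.find cs ['.'] = -1 <;>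
            simp [hfi, hfd] <;>
              (first | omega | (split_ifs <;> omega) | (intro h; omega) | simp_all <;> omega)

-- ===== VERDICT (by name: the statement is the Claim_ definition above) =====
theorem check_decimals_spec : Claim_equal_check_decimals := by
  intro val _
  unfold Spec_check_decimals check_decimals check_decimals_alt
  rw [main_lemma]
  simp [altList, PySem.Str.find, PySem.Str.len]
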